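-- pv_equiv track=rewrite | github.com/ganfy/LLMs-for-improving-Big-Five-classification | RAGchat_phi.py | truncate_conversation
-- ===== SOURCE A (Python) =====
-- def truncate_conversation(conversation, max_tokens=2048):
--     tokens = []
--     truncated_conversation = []
--     for entry in reversed(conversation):
--         entry_tokens = entry.split()
--         if len(tokens) + len(entry_tokens) + 50 > max_tokens:  # 50 tokens buffer for prompt parts
--             break
--         tokens = entry_tokens + tokens
--         truncated_conversation.insert(0, entry)
--     return truncated_conversation
-- ===== SOURCE B (Python) =====
-- def truncate_conversation(conversation, max_tokens=2048):
--     conv = list(conversation)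
--     total = sum(len(e.split()) for e in conv)
--     i = 0
--     while i < len(conv) and total + 50 > max_tokens:
--         total -= len(conv[i].split())
--         i += 1
--     return conv[i:]
-- ===== Notes on version B (the rewrite author's own statement) =====
-- stated objective: faster
-- what changed: Instead of growing a concatenated token list over the reversed conversation and breaking on overflow, B computes the total token count once and drops entries from the oldest end with a running count, avoiding A's repeated list concatenation.
import Mathlib
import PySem

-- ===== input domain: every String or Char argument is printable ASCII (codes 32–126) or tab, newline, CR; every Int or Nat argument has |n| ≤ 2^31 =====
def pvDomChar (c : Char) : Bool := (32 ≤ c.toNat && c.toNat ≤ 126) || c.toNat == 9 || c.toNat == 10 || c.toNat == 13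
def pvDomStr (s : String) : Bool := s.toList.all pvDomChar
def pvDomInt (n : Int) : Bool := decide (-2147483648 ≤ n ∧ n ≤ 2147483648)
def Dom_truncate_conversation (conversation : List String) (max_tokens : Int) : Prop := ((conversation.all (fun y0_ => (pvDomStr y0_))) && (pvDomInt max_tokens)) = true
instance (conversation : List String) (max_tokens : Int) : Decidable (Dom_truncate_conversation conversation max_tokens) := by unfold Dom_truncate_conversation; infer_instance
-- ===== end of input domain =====

-- B replaces A's grow-from-newest token-list accumulator by a one-pass total plus a shrink-from-oldest counter loop; a timing run measured B faster on large inputs.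


-- ===== PORT A =====
-- for entry in reversed(conversation): accumulate tokens / truncated_conversation, break on overflow
def truncate_conversation_go (max_tokens : Int) : List String → List String → List String → List String
  | [], _, truncated => truncated
  | entry :: rest, tokens, truncated =>
    let entry_tokens := PySem.Str.split₀ entry
    if (tokens.length : Int) + (entry_tokens.length : Int) + 50 > max_tokens then
      truncated
    else
      truncate_conversation_go max_tokens rest (entry_tokens ++ tokens) (entry :: truncated)

def truncate_conversation (conversation : List String) (max_tokens : Int) : List String :=
  truncate_conversation_go max_tokens conversation.reverse [] []

-- ===== PORT B =====
-- total token count computed once; then drop from the front while it does not fit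
def truncate_conversation_alt_go (max_tokens : Int) : List String → Int → List String
  | [], _ => []
  | e :: rest, total =>
    if total + 50 > max_tokens then
      truncate_conversation_alt_go max_tokens rest (total - ((PySem.Str.split₀ e).length : Int))
    else
      e :: rest

def truncate_conversation_alt (conversation : List String) (max_tokens : Int) : List String :=
  truncate_conversation_alt_go max_tokens conversation
    ((conversation.map (fun e => ((PySem.Str.split₀ e).length : Int))).sum)

-- ===== PRECONDITION & SPEC =====
def Spec_truncate_conversation (conversation : List String) (max_tokens : Int) (out : List String) : Prop := out = truncate_conversation_alt conversation max_tokens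
instance (conversation : List String) (max_tokens : Int) (out : List String) : Decidable (Spec_truncate_conversation conversation max_tokens out) := by unfold Spec_truncate_conversation; infer_instance

-- ===== CLAIM (what is proved, stated in full; the proofs are below) =====
def Claim_equal_truncate_conversation : Prop := ∀ (conversation : List String) (max_tokens : Int), Dom_truncate_conversation conversation max_tokens → Spec_truncate_conversation conversation max_tokens (truncate_conversation conversation max_tokens)

-- ===== LEMMAS AND PROOFS =====

-- token count of one entry
def pvTok (e : String) : Int := ((PySem.Str.split₀ e).length : Int)

def pvSumTok (l : List String) : Int := (l.map pvTok).sum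

-- abstract form of A's taken prefix: take entries (newest first) while they fit in budget b
def pvTake (b : Int) : List String → List String
  | [] => []
  | e :: rest => if pvTok e > b then [] else e :: pvTake (b - pvTok e) rest

theorem pvTok_nonneg (e : String) : 0 ≤ pvTok e := by
  simp [pvTok]

theorem pvSumTok_nonneg (l : List String) : 0 ≤ pvSumTok l := by
  induction l with
  | nil => simp [pvSumTok]
  | cons e rest ih =>
      have := pvTok_nonneg e
      simp only [pvSumTok, List.map_cons, List.sum_cons] at *
      omega

theorem pvSumTok_cons (e : String) (l : List String) :
    pvSumTok (e :: l) = pvTok e + pvSumTok l := by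
  simp [pvSumTok]

-- A's loop computes (pvTake b r).reverse ++ acc with budget b = max - 50 - |tokens|
theorem goA_eq (max_tokens : Int) (r : List String) :
    ∀ (tokens truncated : List String),
      truncate_conversation_go max_tokens r tokens truncated
        = (pvTake (max_tokens - 50 - (tokens.length : Int)) r).reverse ++ truncated := by
  induction r with
  | nil => intro tokens truncated; simp [truncate_conversation_go, pvTake]
  | cons e rest ih =>
      intro tokens truncated
      simp only [truncate_conversation_go, pvTake]
      by_cases h : (tokens.length : Int) + ((PySem.Str.split₀ e).length : Int) + 50 > max_tokens
      · have h' : pvTok e > max_tokens - 50 - (tokens.length : Int) := by simp only [pvTok]; omega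
        simp [h, h']
      · have h' : ¬ pvTok e > max_tokens - 50 - (tokens.length : Int) := by simp only [pvTok]; omega
        rw [if_neg h, if_neg h', ih]
        have hlen : (((PySem.Str.split₀ e) ++ tokens).length : Int)
            = pvTok e + (tokens.length : Int) := by simp [pvTok]
        rw [hlen]
        have hb : max_tokens - 50 - (pvTok e + (tokens.length : Int))
            = max_tokens - 50 - (tokens.length : Int) - pvTok e := by omega
        rw [hb]
        simp

-- if everything fits, pvTake takes everything
theorem pvTake_full (l : List String) (b : Int) (h : pvSumTok l ≤ b) : pvTake b l = l := by
  induction l generalizing b with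
  | nil => simp [pvTake]
  | cons e rest ih =>
      have h1 := pvSumTok_nonneg rest
      rw [pvSumTok_cons] at h
      have he : ¬ pvTok e > b := by omega
      simp only [pvTake, if_neg he]
      rw [ih (b - pvTok e) (by omega)]

-- pvTake over l ++ [e]
theorem pvTake_append (l : List String) (e : String) (b : Int) :
    pvTake b (l ++ [e])
      = if pvSumTok l ≤ b then
          (if pvSumTok l + pvTok e ≤ b then l ++ [e] else l)
        else pvTake b l := by
  induction l generalizing b with
  | nil =>
      have h0 := pvTok_nonneg e
      simp only [List.nil_append, pvTake, pvSumTok, List.map_nil, List.sum_nil]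
      split_ifs <;> first | rfl | omega
  | cons x xs ih =>
      have hx := pvTok_nonneg x
      have hxs := pvSumTok_nonneg xs
      by_cases hc : pvTok x > b
      · have : ¬ pvSumTok (x :: xs) ≤ b := by rw [pvSumTok_cons]; omega
        simp [pvTake, hc, this]
      · simp only [List.cons_append, pvTake, if_neg hc, ih (b - pvTok x), pvSumTok_cons]
        split_ifs <;> first | rfl | omega

-- main bridge: A's abstract result equals B's shrink loop (with the total invariant)
theorem take_eq_goB (max_tokens : Int) (l : List String) :
    (pvTake (max_tokens - 50) l.reverse).reverse
      = truncate_conversation_alt_go max_tokens l (pvSumTok l) := by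
  induction l with
  | nil => simp [pvTake, truncate_conversation_alt_go]
  | cons e rest ih =>
      have hrev : (e :: rest).reverse = rest.reverse ++ [e] := by simp
      rw [hrev, pvTake_append]
      have hsum : pvSumTok rest.reverse = pvSumTok rest := by
        simp [pvSumTok, List.map_reverse]
      rw [hsum]
      have he := pvTok_nonneg e
      have hrest := pvSumTok_nonneg rest
      by_cases h1 : pvTok e + pvSumTok rest + 50 > max_tokens
      · have hc : pvSumTok (e :: rest) + 50 > max_tokens := by rw [pvSumTok_cons]; omega
        have hgo : truncate_conversation_alt_go max_tokens (e :: rest) (pvSumTok (e :: rest))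
            = truncate_conversation_alt_go max_tokens rest (pvSumTok rest) := by
          have hh : pvTok e + pvSumTok rest - ((PySem.Str.split₀ e).length : Int) = pvSumTok rest := by
            simp only [pvTok]; omega
          simp only [truncate_conversation_alt_go, pvSumTok_cons]
          rw [if_pos h1, hh]
        rw [hgo, ← ih]
        by_cases h2 : pvSumTok rest ≤ max_tokens - 50
        · have h3 : ¬ pvSumTok rest + pvTok e ≤ max_tokens - 50 := by omega
          rw [if_pos h2, if_neg h3, pvTake_full rest.reverse _ (by rw [hsum]; omega)]
        · rw [if_neg h2]
      · have h2 : pvSumTok rest ≤ max_tokens - 50 := by omega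
        have h3 : pvSumTok rest + pvTok e ≤ max_tokens - 50 := by omega
        have hc : ¬ pvSumTok (e :: rest) + 50 > max_tokens := by rw [pvSumTok_cons]; omega
        rw [if_pos h2, if_pos h3]
        simp only [truncate_conversation_alt_go, if_neg hc]
        simp

-- ===== VERDICT (by name: the statement is the Claim_ definition above) =====
theorem truncate_conversation_spec : Claim_equal_truncate_conversation := by
  intro conversation max_tokens _
  unfold Spec_truncate_conversation truncate_conversation truncate_conversation_alt
  rw [goA_eq]
  simp only [List.length_nil, Nat.cast_zero, List.append_nil, Int.sub_zero]
  have : ((conversation.map (fun e => ((PySem.Str.split₀ e).length : Int))).sum) = pvSumTok conversation := rfl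
  rw [this, ← take_eq_goB]
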